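-- pv_equiv track=rewrite | github.com/rgrannell1/char--align | src/align_selections.py | filter_selections
-- ===== SOURCE A (Python) =====
-- def filter_selections (positions):
--
-- 	rows = { }
--
-- 	for row, col in positions:
--
-- 		if row in rows:
-- 			rows[row] = min(rows[row], col)
-- 		else:
-- 			rows[row] = col
--
-- 	return [(row, col) for row, col in rows.items( )]
-- ===== SOURCE B (Python) =====
-- def filter_selections(positions):
--     rows = list(dict.fromkeys(row for row, _ in positions))
--     return [(row, min(col for r, col in positions if r == row)) for row in rows]
-- ===== Notes on version B (the rewrite author's own statement) =====
-- stated objective: alternative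
-- what changed: Replaces A's single pass maintaining a running-min dict with a dict-free two-stage structure: first collect the distinct rows in first-appearance order (dict.fromkeys), then for each row rescan the position list and take min of its columns.
import Mathlib
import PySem

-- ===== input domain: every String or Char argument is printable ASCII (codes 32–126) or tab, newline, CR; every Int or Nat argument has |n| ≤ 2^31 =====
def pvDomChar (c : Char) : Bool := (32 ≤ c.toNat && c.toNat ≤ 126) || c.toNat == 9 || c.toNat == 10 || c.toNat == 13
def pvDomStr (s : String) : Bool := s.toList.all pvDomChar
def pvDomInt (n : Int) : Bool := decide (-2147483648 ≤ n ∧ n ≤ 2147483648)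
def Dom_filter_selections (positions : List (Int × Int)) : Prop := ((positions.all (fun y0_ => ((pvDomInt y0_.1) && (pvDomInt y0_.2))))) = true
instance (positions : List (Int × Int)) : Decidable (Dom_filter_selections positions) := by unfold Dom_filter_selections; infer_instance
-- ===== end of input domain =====

-- B replaces A's single pass with a running-min dict by a dict-free two-stage
-- structure: collect distinct rows in first-appearance order, then rescan the
-- list per row taking min of its columns; alternative, not claimed faster.

-- ===== PORT A =====
-- loop body of A: keep the running minimum per row in the dict
def pvStepA (d : PySem.Dict Int Int) (p : Int × Int) : PySem.Dict Int Int :=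
  if d.contains p.1 then d.insert p.1 (min (d.getD p.1 0) p.2)
  else d.insert p.1 p.2

def filter_selections (positions : List (Int × Int)) : List (Int × Int) :=
  (positions.foldl pvStepA PySem.Dict.empty).items.map (fun p => (p.1, p.2))   -- [(row, col) for row, col in rows.items()]

-- ===== PORT B =====
def filter_selections_alt (positions : List (Int × Int)) : List (Int × Int) :=
  -- rows = list(dict.fromkeys(row for row, _ in positions))
  let rows := PySem.List.dedup (positions.map (fun p => p.1))
  -- [(row, min(col for r, col in positions if r == row)) for row in rows];
  -- the filtered list is nonempty for every row in rows, so the default 0 is never used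
  rows.map (fun row =>
    (row, (PySem.List.min? ((positions.filter (fun q => q.1 == row)).map (fun q => q.2)) (fun y => y)).getD 0))

-- ===== PRECONDITION & SPEC =====
def Spec_filter_selections (positions : List (Int × Int)) (out : List (Int × Int)) : Prop := out = filter_selections_alt positions
instance (positions : List (Int × Int)) (out : List (Int × Int)) : Decidable (Spec_filter_selections positions out) := by unfold Spec_filter_selections; infer_instance

-- ===== CLAIM =====
def Claim_equal_filter_selections : Prop := ∀ (positions : List (Int × Int)), Dom_filter_selections positions → Spec_filter_selections positions (filter_selections positions)

-- ===== LEMMAS AND PROOFS =====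

-- the running-min step on Option Int that A's loop performs at one key
def pvMinStep (o : Option Int) (c : Int) : Option Int :=
  some (match o with | some v => min v c | none => c)

theorem pvStepA_eq_insert (d : PySem.Dict Int Int) (p : Int × Int) :
    pvStepA d p = d.insert p.1 ((pvMinStep (d.get? p.1) p.2).getD 0) := by
  unfold pvStepA pvMinStep
  cases h : d.get? p.1 with
  | none =>
    have hc : d.contains p.1 = false := by
      rw [PySem.Dict.contains_eq_isSome_get?, h]; rfl
    simp [hc]
  | some v =>
    have hc : d.contains p.1 = true := by
      rw [PySem.Dict.contains_eq_isSome_get?, h]; rfl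
    simp [hc, PySem.Dict.getD_eq_get?_getD, h]

theorem getA_foldl (l : List (Int × Int)) :
    ∀ (d : PySem.Dict Int Int) (k : Int),
    (l.foldl pvStepA d).get? k
      = ((l.filter (fun p => p.1 == k)).map (·.2)).foldl pvMinStep (d.get? k) := by
  induction l with
  | nil => intro d k; rfl
  | cons p t ih =>
    intro d k
    by_cases hk : p.1 = k
    · subst hk
      simp only [List.foldl_cons, List.filter_cons, beq_self_eq_true, if_pos, List.map_cons]
      rw [ih]
      have : (pvStepA d p).get? p.1 = pvMinStep (d.get? p.1) p.2 := by
        rw [pvStepA_eq_insert, PySem.Dict.get?_insert_self]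
        unfold pvMinStep; cases d.get? p.1 <;> rfl
      rw [this]
    · have hne : (p.1 == k) = false := by simp [hk]
      simp only [List.foldl_cons, List.filter_cons, hne, Bool.false_eq_true, if_neg, not_false_iff]
      rw [ih]
      have : (pvStepA d p).get? k = d.get? k := by
        rw [pvStepA_eq_insert]
        exact PySem.Dict.get?_insert_of_ne _ _ (fun h => hk h.symm)
      rw [this]

theorem pvMinStep_foldl_some (t : List Int) :
    ∀ v : Int, t.foldl pvMinStep (some v) = some (t.foldl min v) := by
  induction t with
  | nil => intro v; rfl
  | cons c t ih => intro v; simp only [List.foldl_cons]; exact ih (min v c)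

theorem keysA (positions : List (Int × Int)) :
    (positions.foldl pvStepA PySem.Dict.empty).keys
      = PySem.Set.ofList (positions.map (·.1)) := by
  have hstep : pvStepA = fun d x => d.insert x.1 ((pvMinStep (d.get? x.1) x.2).getD 0) := by
    funext d p; exact pvStepA_eq_insert d p
  rw [hstep, PySem.Dict.keys_foldl_insert_key, PySem.Dict.keys_empty,
    PySem.Set.update_nil_left]

theorem filter_selections_eq (positions : List (Int × Int)) :
    filter_selections positions = filter_selections_alt positions := by
  unfold filter_selections filter_selections_alt
  set dA := positions.foldl pvStepA PySem.Dict.empty with hdA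
  have hkA : dA.keys = PySem.Set.ofList (positions.map (·.1)) := keysA positions
  have hndA : dA.keys.Nodup := by rw [hkA]; exact PySem.Set.nodup_ofList _
  rw [PySem.Dict.items_eq_map_keys dA hndA 0, hkA, List.map_map,
    PySem.List.dedup_eq_ofList]
  apply List.map_congr_left
  intro k hk
  have hkmem : k ∈ positions.map (·.1) := (PySem.Set.mem_ofList _ _).mp hk
  obtain ⟨p, hp, hpk⟩ := List.mem_map.mp hkmem
  have hpf : p ∈ positions.filter (fun q => q.1 == k) := by
    rw [List.mem_filter]; exact ⟨hp, by simp [hpk]⟩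
  have hne : (positions.filter (fun q => q.1 == k)).map (·.2) ≠ [] := by
    intro h
    exact (List.ne_nil_of_mem (List.mem_map_of_mem hpf)) h
  cases hc : (positions.filter (fun q => q.1 == k)).map (·.2) with
  | nil => exact absurd hc hne
  | cons c t =>
    have hA : dA.get? k = some (t.foldl min c) := by
      rw [hdA, getA_foldl, PySem.Dict.get?_empty, hc]
      simp only [List.foldl_cons]
      have : pvMinStep none c = some c := rfl
      rw [this, pvMinStep_foldl_some]
    simp only [Function.comp]
    rw [PySem.List.min?_id_cons, PySem.Dict.getD_eq_get?_getD, hA]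

-- ===== VERDICT =====
theorem filter_selections_spec : Claim_equal_filter_selections := by
  intro positions _
  unfold Spec_filter_selections
  exact filter_selections_eq positions
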